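-- pv_equiv track=rewrite | github.com/MaherMohammed/ML-Scout-A-Machine-Learning-Approach-for-Recommending-Football-Players | recommendations.py | split_times_for_two_periods
-- ===== SOURCE A (Python) =====
-- def split_times_for_two_periods(events ,list_of_times):
--     list_of_first_half_times = []
--     list_of_second_half_times = []
--     list_of_first_half_events = []
--     list_of_second_half_events = []
--
--     index = 0
--     while index < len(list_of_times) - 1:
--         if list_of_times[index] > list_of_times[index + 1]:
--             list_of_first_half_times = list_of_times[0:index + 1]
--             list_of_second_half_times = list_of_times[index + 1:]
--             list_of_first_half_events = events[0:index + 1]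
--             list_of_second_half_events = events[index + 1:]
--
--         index += 1
--
--     return list_of_first_half_times , list_of_second_half_times , list_of_first_half_events , list_of_second_half_events
-- ===== SOURCE B (Python) =====
-- def split_times_for_two_periods(events, list_of_times):
--     # scan backwards for the last index where the times decrease; split there
--     for i in range(len(list_of_times) - 2, -1, -1):
--         if list_of_times[i] > list_of_times[i + 1]:
--             return (list_of_times[:i + 1], list_of_times[i + 1:],
--                     events[:i + 1], events[i + 1:])
--     return [], [], [], []
-- ===== Notes on version B (the rewrite author's own statement) =====
-- stated objective: faster
-- what changed: A scans forward over all adjacent pairs and rebuilds all four slices at every decrease point; B scans backwards and returns at the first decrease it meets (the last one overall), slicing exactly once.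
import Mathlib
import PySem

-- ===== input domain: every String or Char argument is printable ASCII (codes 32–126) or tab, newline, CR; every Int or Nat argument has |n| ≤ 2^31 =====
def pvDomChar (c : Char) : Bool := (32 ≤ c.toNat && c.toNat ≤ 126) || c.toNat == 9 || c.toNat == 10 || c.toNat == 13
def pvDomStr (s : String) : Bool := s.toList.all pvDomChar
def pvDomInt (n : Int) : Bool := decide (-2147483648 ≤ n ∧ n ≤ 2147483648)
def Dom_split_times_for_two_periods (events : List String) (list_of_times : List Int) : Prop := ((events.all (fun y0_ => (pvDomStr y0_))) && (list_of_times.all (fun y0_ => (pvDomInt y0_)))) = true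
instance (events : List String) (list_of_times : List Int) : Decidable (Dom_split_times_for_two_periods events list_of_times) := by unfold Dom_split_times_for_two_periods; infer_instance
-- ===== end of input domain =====

-- B scans backwards and returns at the first decrease found (the last overall), slicing once instead of rebuilding all four slices at every decrease; measured faster; same return value.

-- ===== PORT A =====
-- while loop over index = 0 .. len-1, overwriting the four slices at each decrease
def pvStepA (events : List String) (lt : List Int)
    (st : List Int × List Int × List String × List String) (i : Int) :
    List Int × List Int × List String × List String :=
  if PySem.List.pyGetD lt i 0 > PySem.List.pyGetD lt (i + 1) 0 then
    (PySem.List.slice lt (some 0) (some (i + 1)),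
     PySem.List.slice lt (some (i + 1)) none,
     PySem.List.slice events (some 0) (some (i + 1)),
     PySem.List.slice events (some (i + 1)) none)
  else st

def split_times_for_two_periods (events : List String) (list_of_times : List Int) :
    List Int × List Int × List String × List String :=
  (PySem.List.pyRange 0 ((list_of_times.length : Int) - 1) 1).foldl
    (pvStepA events list_of_times) ([], [], [], [])

-- ===== PORT B =====
-- B's downward for-loop with early return: find the last index i with lt[i] > lt[i+1]
def pvLastDec (lt : List Int) : Nat → Option Nat
  | 0 => if lt.getD 0 0 > lt.getD 1 0 then some 0 else none
  | j + 1 => if lt.getD (j + 1) 0 > lt.getD (j + 2) 0 then some (j + 1) else pvLastDec lt j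

def split_times_for_two_periods_alt (events : List String) (list_of_times : List Int) :
    List Int × List Int × List String × List String :=
  if 2 ≤ list_of_times.length then
    match pvLastDec list_of_times (list_of_times.length - 2) with
    | some i => (list_of_times.take (i + 1), list_of_times.drop (i + 1),
                 events.take (i + 1), events.drop (i + 1))
    | none => ([], [], [], [])
  else ([], [], [], [])

-- ===== PRECONDITION & SPEC =====
def Spec_split_times_for_two_periods (events : List String) (list_of_times : List Int) (out : List Int × List Int × List String × List String) : Prop := out = split_times_for_two_periods_alt events list_of_times
instance (events : List String) (list_of_times : List Int) (out : List Int × List Int × List String × List String) : Decidable (Spec_split_times_for_two_periods events list_of_times out) := by unfold Spec_split_times_for_two_periods; infer_instance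

-- ===== CLAIM (what is proved, stated in full; the proofs are below) =====
def Claim_equal_split_times_for_two_periods : Prop := ∀ (events : List String) (list_of_times : List Int), Dom_split_times_for_two_periods events list_of_times → Spec_split_times_for_two_periods events list_of_times (split_times_for_two_periods events list_of_times)

-- ===== LEMMAS AND PROOFS =====

def pvSplit (events : List String) (lt : List Int) (i : Nat) :
    List Int × List Int × List String × List String :=
  (lt.take (i + 1), lt.drop (i + 1), events.take (i + 1), events.drop (i + 1))

theorem pvStepA_cast (events : List String) (lt : List Int)
    (st : List Int × List Int × List String × List String) (m : Nat) :
    pvStepA events lt st (m : Int) =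
      if lt.getD m 0 > lt.getD (m + 1) 0 then pvSplit events lt m else st := by
  have hc : (m : Int) + 1 = ((m + 1 : Nat) : Int) := by push_cast; ring
  unfold pvStepA pvSplit
  simp only [hc, PySem.List.pyGetD_natCast, PySem.List.slice_zero_start,
    PySem.List.slice_to_natCast, PySem.List.slice_from_natCast]

theorem pvFold_eq (events : List String) (lt : List Int) (m : Nat) :
    (PySem.List.pyRange 0 ((m : Int) + 1) 1).foldl (pvStepA events lt) ([], [], [], []) =
      (match pvLastDec lt m with
       | some i => pvSplit events lt i
       | none => ([], [], [], [])) := by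
  induction m with
  | zero =>
    rw [show ((0 : Nat) : Int) + 1 = (0 : Int) + 1 by norm_num, PySem.List.pyRange_one_singleton]
    simp only [List.foldl_cons, List.foldl_nil]
    rw [show ((0 : Int)) = ((0 : Nat) : Int) by norm_num, pvStepA_cast]
    simp only [pvLastDec]
    split_ifs <;> simp
  | succ k ih =>
    have h1 : ((k + 1 : Nat) : Int) + 1 = (((k : Int) + 1) + 1) := by push_cast; ring
    rw [h1, PySem.List.pyRange_one_succ_right (by positivity), List.foldl_append]
    simp only [List.foldl_cons, List.foldl_nil]
    rw [show ((k : Int) + 1) = ((k + 1 : Nat) : Int) by push_cast; ring, pvStepA_cast,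
        show ((k + 1 : Nat) : Int) = ((k : Int) + 1) by push_cast; ring, ih]
    simp only [pvLastDec]
    have h2 : k + 1 + 1 = k + 2 := by omega
    rw [h2]
    split_ifs <;> rfl

-- ===== VERDICT (by name: the statement is the Claim_ definition above) =====
theorem split_times_for_two_periods_spec : Claim_equal_split_times_for_two_periods := by
  intro events lt _
  unfold Spec_split_times_for_two_periods split_times_for_two_periods split_times_for_two_periods_alt
  match hn : lt.length with
  | 0 =>
    rw [PySem.List.pyRange_one_eq_nil (by norm_num)]
    simp
  | 1 =>
    rw [PySem.List.pyRange_one_eq_nil (by norm_num)]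
    simp
  | (k + 2) =>
    have h1 : ((k + 2 : Nat) : Int) - 1 = ((k : Int) + 1) := by push_cast; ring
    have h2 : k + 2 - 2 = k := by omega
    rw [h1, pvFold_eq, if_pos (by omega), h2]
    cases pvLastDec lt k <;> rfl
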